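-- pv_equiv track=rewrite | github.com/enderst3/challenges | replace_nth.py | replace_nth
-- ===== SOURCE A (Python) =====
-- def replace_nth(text, n, old, new):
--     if n <= 0:
--         return text
--
--     i = 0
--     out = []
--
--     for pos, c in enumerate(text):
--         if c == old:
--             i += 1
--             if i % n == 0:
--                 out.append(new)
--                 continue
--         out.append(c)
--
--     return ''.join(out)
-- ===== SOURCE B (Python) =====
-- def replace_nth(text, n, old, new):
--     if n <= 0:
--         return text
--     positions = [i for i, c in enumerate(text) if c == old]
--     targets = {p for k, p in enumerate(positions) if k % n == n - 1}
--     return ''.join(new if i in targets else c for i, c in enumerate(text))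
-- ===== Notes on version B (the rewrite author's own statement) =====
-- stated objective: alternative
-- what changed: A interleaves matching and output in one pass with a running occurrence counter; B first collects all match positions, selects every n-th one into a set of target indices, then rebuilds the string in a second pass from that set.
import Mathlib
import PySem

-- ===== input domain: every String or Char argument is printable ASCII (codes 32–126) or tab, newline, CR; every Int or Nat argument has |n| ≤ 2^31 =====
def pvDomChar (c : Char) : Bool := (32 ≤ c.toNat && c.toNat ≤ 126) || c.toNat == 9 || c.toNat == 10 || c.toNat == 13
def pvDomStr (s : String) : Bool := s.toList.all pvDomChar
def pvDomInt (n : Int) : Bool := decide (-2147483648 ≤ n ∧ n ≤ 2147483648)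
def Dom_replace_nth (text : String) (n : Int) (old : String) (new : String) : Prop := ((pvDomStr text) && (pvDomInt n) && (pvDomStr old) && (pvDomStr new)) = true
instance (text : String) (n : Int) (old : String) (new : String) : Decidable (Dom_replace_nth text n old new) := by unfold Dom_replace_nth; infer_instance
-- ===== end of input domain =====

-- B replaces A's running-counter single pass by an index-first two-pass decomposition
-- (collect match positions, select every n-th one into a set, rebuild); objective: alternative.


-- ===== PORT A =====
-- loop body of A: if c == old: i += 1; if i % n == 0: out.append(new); continue
--                 out.append(c)
def rnStepA (n : Int) (old new : String) (st : Int × List String) (pc : Int × Char) : Int × List String :=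
  if String.ofList [pc.2] == old then
    let i := st.1 + 1
    if PySem.Int.mod i n == 0 then (i, st.2 ++ [new]) else (i, st.2 ++ [String.ofList [pc.2]])
  else (st.1, st.2 ++ [String.ofList [pc.2]])

def replace_nth (text : String) (n : Int) (old : String) (new : String) : String :=
  if n ≤ 0 then text
  else
    -- i = 0; out = []; for pos, c in enumerate(text): …; return ''.join(out)
    let st := (PySem.List.enumerate text.toList).foldl (rnStepA n old new) ((0 : Int), ([] : List String))
    PySem.Str.join "" st.2

-- ===== PORT B =====
def replace_nth_alt (text : String) (n : Int) (old : String) (new : String) : String :=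
  if n ≤ 0 then text
  else
    -- positions = [i for i, c in enumerate(text) if c == old]
    let positions : List Int :=
      ((PySem.List.enumerate text.toList).filter (fun pc => String.ofList [pc.2] == old)).map (·.1)
    -- targets = {p for k, p in enumerate(positions) if k % n == n - 1}
    let targets : PySem.Set Int :=
      PySem.Set.ofList
        (((PySem.List.enumerate positions).filter (fun kp => PySem.Int.mod kp.1 n == n - 1)).map (·.2))
    -- ''.join(new if i in targets else c for i, c in enumerate(text))
    PySem.Str.join ""
      ((PySem.List.enumerate text.toList).map
        (fun pc => if PySem.Set.contains targets pc.1 then new else String.ofList [pc.2]))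

-- ===== PRECONDITION & SPEC =====
def Spec_replace_nth (text : String) (n : Int) (old : String) (new : String) (out : String) : Prop := out = replace_nth_alt text n old new
instance (text : String) (n : Int) (old : String) (new : String) (out : String) : Decidable (Spec_replace_nth text n old new out) := by unfold Spec_replace_nth; infer_instance

-- ===== CLAIM (what is proved, stated in full; the proofs are below) =====
def Claim_equal_replace_nth : Prop := ∀ (text : String) (n : Int) (old : String) (new : String), Dom_replace_nth text n old new → Spec_replace_nth text n old new (replace_nth text n old new)

-- ===== LEMMAS AND PROOFS =====

-- the string emitted for each character, by recursion on the text with the occurrence counter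
def rnSpec (n : Int) (old new : String) : List Char → Int → List String
  | [], _ => []
  | c :: t, i =>
    if String.ofList [c] == old then
      (if PySem.Int.mod (i + 1) n == 0 then new else String.ofList [c]) :: rnSpec n old new t (i + 1)
    else String.ofList [c] :: rnSpec n old new t i

-- positions (offset p) whose occurrence counter (offset i) hits a multiple of n
def rnSel (n : Int) (old : String) : List Char → Int → Int → List Int
  | [], _, _ => []
  | c :: t, p, i =>
    if String.ofList [c] == old then
      (if PySem.Int.mod (i + 1) n == 0 then [p] else []) ++ rnSel n old t (p + 1) (i + 1)
    else rnSel n old t (p + 1) i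

-- positions of matches in t, offset p
def rnPos (old : String) : List Char → Int → List Int
  | [], _ => []
  | c :: t, p =>
    if String.ofList [c] == old then p :: rnPos old t (p + 1) else rnPos old t (p + 1)

theorem rnA_fold (n : Int) (old new : String) (cs : List Char) :
    ∀ (p i : Int) (acc : List String),
      ((PySem.List.enumerate cs p).foldl (rnStepA n old new) (i, acc)).2 =
        acc ++ rnSpec n old new cs i := by
  induction cs with
  | nil => intro p i acc; simp [PySem.List.enumerate_nil, rnSpec]
  | cons c t ih =>
    intro p i acc
    rw [PySem.List.enumerate_cons, List.foldl_cons]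
    by_cases hm : (String.ofList [c] == old) = true
    · by_cases hz : (PySem.Int.mod (i + 1) n == 0) = true
      · have hstep : rnStepA n old new (i, acc) (p, c) = (i + 1, acc ++ [new]) := by
          simp [rnStepA, hm, hz]
        rw [hstep, ih (p + 1) (i + 1) (acc ++ [new])]
        simp [rnSpec, hm, hz]
      · have hstep : rnStepA n old new (i, acc) (p, c) = (i + 1, acc ++ [String.ofList [c]]) := by
          simp [rnStepA, hm, hz]
        rw [hstep, ih (p + 1) (i + 1) (acc ++ [String.ofList [c]])]
        simp [rnSpec, hm, hz]
    · have hstep : rnStepA n old new (i, acc) (p, c) = (i, acc ++ [String.ofList [c]]) := by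
        simp [rnStepA, hm]
      rw [hstep, ih (p + 1) i (acc ++ [String.ofList [c]])]
      simp [rnSpec, hm]

theorem rnPos_eq (old : String) (cs : List Char) :
    ∀ p : Int,
      (((PySem.List.enumerate cs p).filter (fun pc => String.ofList [pc.2] == old)).map (·.1)) =
        rnPos old cs p := by
  induction cs with
  | nil => intro p; simp [PySem.List.enumerate_nil, rnPos]
  | cons c t ih =>
    intro p
    rw [PySem.List.enumerate_cons]
    by_cases hm : (String.ofList [c] == old) = true
    · simp [hm, rnPos, ih (p + 1)]
    · simp [hm, rnPos, ih (p + 1)]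

-- the 'k % n == n - 1' selection on the position list equals the counter-based selection
theorem rnSel_eq (n : Int) (hn : 0 < n) (old : String) (cs : List Char) :
    ∀ (p k : Int),
      (((PySem.List.enumerate (rnPos old cs p) k).filter
          (fun kp => PySem.Int.mod kp.1 n == n - 1)).map (·.2)) =
        rnSel n old cs p k := by
  induction cs with
  | nil => intro p k; simp [rnPos, PySem.List.enumerate_nil, rnSel]
  | cons c t ih =>
    intro p k
    by_cases hm : (String.ofList [c] == old) = true
    · have hmk : PySem.Int.mod (k + 1) n = 0 ↔ PySem.Int.mod k n = n - 1 := by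
        rw [PySem.Int.mod_eq_emod_of_pos hn, PySem.Int.mod_eq_emod_of_pos hn]
        have h1 : (k + 1) % n = (k % n + 1) % n := by
          conv_rhs => rw [Int.add_emod, Int.emod_emod_of_dvd k (dvd_refl n), ← Int.add_emod]
        have h2 : 0 ≤ k % n := Int.emod_nonneg k (by omega)
        have h3 : k % n < n := Int.emod_lt_of_pos k hn
        constructor
        · intro h
          by_contra hne
          have h4 : k % n + 1 < n := by omega
          have : (k % n + 1) % n = k % n + 1 := Int.emod_eq_of_lt (by omega) h4
          omega
        · intro h
          rw [h1, h, Int.sub_add_cancel, Int.emod_self]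
      simp only [rnPos, rnSel, hm, if_true]
      by_cases hz : (PySem.Int.mod (k + 1) n == 0) = true
      · have hk : (PySem.Int.mod k n == n - 1) = true := by
          simp only [beq_iff_eq] at hz ⊢; exact hmk.1 hz
        rw [PySem.List.enumerate_cons]
        simp [hk, hz, ih (p + 1) (k + 1)]
      · have hk : (PySem.Int.mod k n == n - 1) = false := by
          simp only [beq_iff_eq] at hz
          rw [beq_eq_false_iff_ne]
          intro h; exact hz (hmk.2 h)
        rw [PySem.List.enumerate_cons]
        simp [hk, hz, ih (p + 1) (k + 1)]
    · simp only [rnPos, rnSel, hm]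
      exact ih (p + 1) k

-- every selected position is ≥ the offset
theorem rnSel_lb (n : Int) (old : String) (cs : List Char) :
    ∀ (p i q : Int), q ∈ rnSel n old cs p i → p ≤ q := by
  induction cs with
  | nil => intro p i q h; simp [rnSel] at h
  | cons c t ih =>
    intro p i q h
    by_cases hm : (String.ofList [c] == old) = true
    · simp only [rnSel, hm, if_true, List.mem_append] at h
      rcases h with h | h
      · by_cases hz : (PySem.Int.mod (i + 1) n == 0) = true
        · simp [hz] at h; omega
        · simp [hz] at h
      · have := ih (p + 1) (i + 1) q h; omega
    · simp only [rnSel, hm] at h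
      have := ih (p + 1) i q h; omega

theorem rnB_map (n : Int) (old new : String) (cs : List Char) :
    ∀ (p i : Int) (S : PySem.Set Int),
      (∀ q : Int, p ≤ q → (PySem.Set.contains S q = true ↔ q ∈ rnSel n old cs p i)) →
      ((PySem.List.enumerate cs p).map
        (fun pc => if PySem.Set.contains S pc.1 then new else String.ofList [pc.2])) =
        rnSpec n old new cs i := by
  induction cs with
  | nil => intro p i S _; simp [PySem.List.enumerate_nil, rnSpec]
  | cons c t ih =>
    intro p i S hS
    rw [PySem.List.enumerate_cons, List.map_cons]
    by_cases hm : (String.ofList [c] == old) = true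
    · by_cases hz : (PySem.Int.mod (i + 1) n == 0) = true
      · have hp : PySem.Set.contains S p = true := by
          rw [hS p le_rfl]
          simp [rnSel, hm, hz]
        have ht : ((PySem.List.enumerate t (p + 1)).map
            (fun pc => if PySem.Set.contains S pc.1 then new else String.ofList [pc.2])) =
            rnSpec n old new t (i + 1) := by
          apply ih (p + 1) (i + 1) S
          intro q hq
          rw [hS q (by omega)]
          simp only [rnSel, hm, hz, if_true, List.singleton_append]
          rw [List.mem_cons]
          constructor
          · rintro (h | h)
            · omega
            · exact h
          · exact fun h => Or.inr h
        rw [ht, if_pos hp]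
        simp [rnSpec, hm, hz]
      · have hp : PySem.Set.contains S p = false := by
          rw [Bool.eq_false_iff]
          intro hc
          have hmem := (hS p le_rfl).1 hc
          simp only [rnSel, hm, hz, if_true] at hmem
          have := rnSel_lb n old t (p + 1) (i + 1) p hmem
          omega
        have ht : ((PySem.List.enumerate t (p + 1)).map
            (fun pc => if PySem.Set.contains S pc.1 then new else String.ofList [pc.2])) =
            rnSpec n old new t (i + 1) := by
          apply ih (p + 1) (i + 1) S
          intro q hq
          rw [hS q (by omega)]
          simp [rnSel, hm, hz]
        rw [ht, if_neg (by simp only [hp]; simp)]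
        simp [rnSpec, hm, hz]
    · have hp : PySem.Set.contains S p = false := by
        rw [Bool.eq_false_iff]
        intro hc
        have hmem := (hS p le_rfl).1 hc
        simp only [rnSel, hm] at hmem
        have := rnSel_lb n old t (p + 1) i p hmem
        omega
      have ht : ((PySem.List.enumerate t (p + 1)).map
          (fun pc => if PySem.Set.contains S pc.1 then new else String.ofList [pc.2])) =
          rnSpec n old new t i := by
        apply ih (p + 1) i S
        intro q hq
        rw [hS q (by omega)]
        simp [rnSel, hm]
      rw [ht, if_neg (by simp only [hp]; simp)]
      simp [rnSpec, hm]

-- ===== VERDICT (by name: the statement is the Claim_ definition above) =====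
theorem replace_nth_spec : Claim_equal_replace_nth := by
  intro text n old new _hdom
  unfold Spec_replace_nth replace_nth replace_nth_alt
  by_cases hn : n ≤ 0
  · simp [hn]
  · have hpos : 0 < n := by omega
    simp only [hn, if_false]
    congr 1
    rw [rnA_fold n old new text.toList 0 0 [], List.nil_append]
    symm
    apply rnB_map n old new text.toList 0 0
    intro q _hq
    rw [rnPos_eq old text.toList 0, rnSel_eq n hpos old text.toList 0 0]
    constructor
    · intro h
      exact (PySem.Set.mem_ofList _ _).1 ((PySem.Set.contains_iff _ _).1 h)
    · intro h
      exact (PySem.Set.contains_iff _ _).2 ((PySem.Set.mem_ofList _ _).2 h)
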